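-- pv_equiv track=rewrite | github.com/MPragna83/turing-owlNew | backend/core/exit_codes.py | exit_code
-- ===== SOURCE A (Python) =====
-- def exit_code(findings):
--     if any(f["severity"] == "critical" for f in findings):
--         return 3
--     if any(f["severity"] == "high" for f in findings):
--         return 2
--     if findings:
--         return 1
--     return 0
-- ===== SOURCE B (Python) =====
-- def exit_code(findings):
--     has_high = False
--     for f in findings:
--         sev = f["severity"]
--         if sev == "critical":
--             return 3
--         if sev == "high":
--             has_high = True
--     if has_high:
--         return 2
--     if findings:
--         return 1
--     return 0
-- ===== Notes on version B (the rewrite author's own statement) =====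
-- stated objective: simpler
-- what changed: Replaces the two short-circuiting any() scans with a single loop that returns 3 on the first critical and tracks a has_high flag, deciding 2/1/0 after the loop.
import Mathlib
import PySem

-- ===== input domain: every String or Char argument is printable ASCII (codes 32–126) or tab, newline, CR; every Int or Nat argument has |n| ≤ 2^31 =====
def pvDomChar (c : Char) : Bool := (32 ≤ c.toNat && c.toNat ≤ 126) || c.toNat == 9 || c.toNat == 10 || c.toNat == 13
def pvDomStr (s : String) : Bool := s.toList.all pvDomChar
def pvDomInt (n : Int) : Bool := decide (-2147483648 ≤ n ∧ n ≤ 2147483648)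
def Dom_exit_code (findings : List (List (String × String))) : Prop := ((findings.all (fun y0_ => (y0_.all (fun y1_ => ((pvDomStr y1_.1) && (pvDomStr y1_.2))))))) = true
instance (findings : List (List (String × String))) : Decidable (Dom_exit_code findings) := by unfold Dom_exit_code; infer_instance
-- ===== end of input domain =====

-- B folds the two any() scans into one pass with a has_high flag (simpler, single traversal); return value only.

-- ===== PORT A =====
-- f["severity"] ported as first-match association-list lookup; Pre_ guarantees the key exists (else Python raises KeyError).
def exit_code (findings : List (List (String × String))) : Int :=
  if findings.any (fun f => f.lookup "severity" == some "critical") then 3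
  else if findings.any (fun f => f.lookup "severity" == some "high") then 2
  else if !findings.isEmpty then 1
  else 0

-- ===== PORT B =====
-- the for-loop of Source B: early return 3 on critical (.inl), otherwise carries has_high (.inr)
def exitLoop : List (List (String × String)) → Bool → Sum Int Bool
  | [], hasHigh => .inr hasHigh
  | f :: rest, hasHigh =>
    let sev := f.lookup "severity"
    if sev == some "critical" then .inl 3
    else exitLoop rest (hasHigh || sev == some "high")

def exit_code_alt (findings : List (List (String × String))) : Int :=
  match exitLoop findings false with
  | .inl r => r
  | .inr hasHigh =>
    if hasHigh then 2
    else if !findings.isEmpty then 1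
    else 0

-- ===== PRECONDITION & SPEC =====
-- Pre_ excludes exactly the inputs where both Pythons raise KeyError: a finding lacking a
-- "severity" key that is reached before any critical finding (the scans stop at the first critical).
def Pre_exit_code (findings : List (List (String × String))) : Prop :=
  ∀ f ∈ findings.takeWhile (fun f => !(f.lookup "severity" == some "critical")),
    (f.lookup "severity").isSome
instance (findings : List (List (String × String))) : Decidable (Pre_exit_code findings) := by unfold Pre_exit_code; infer_instance
def pvWitness_exit_code : (List (List (String × String))) := [[("severity", "high")], [("severity", "low")]]

def Spec_exit_code (findings : List (List (String × String))) (out : Int) : Prop := out = exit_code_alt findings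
instance (findings : List (List (String × String))) (out : Int) : Decidable (Spec_exit_code findings out) := by unfold Spec_exit_code; infer_instance

-- ===== CLAIM (what is proved, stated in full; the proofs are below) =====
def Claim_equal_exit_code : Prop := ∀ (findings : List (List (String × String))), Dom_exit_code findings → Pre_exit_code findings → Spec_exit_code findings (exit_code findings)

-- ===== LEMMAS AND PROOFS =====
-- characterisation of B's loop in terms of A's two scans
theorem exitLoop_eq (fs : List (List (String × String))) (h : Bool) :
    exitLoop fs h =
      if fs.any (fun f => f.lookup "severity" == some "critical") then .inl 3
      else .inr (h || fs.any (fun f => f.lookup "severity" == some "high")) := by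
  induction fs generalizing h with
  | nil => simp [exitLoop]
  | cons f rest ih =>
    simp only [exitLoop, List.any_cons]
    by_cases hc : f.lookup "severity" == some "critical"
    · simp [hc]
    · simp only [hc, Bool.false_or, ih]
      by_cases hr : rest.any (fun f => f.lookup "severity" == some "critical")
      · simp [hr]
      · simp [hr, Bool.or_assoc]

-- ===== VERDICT (by name: the statement is the Claim_ definition above) =====
theorem exit_code_spec : Claim_equal_exit_code := by
  intro findings _ _
  unfold Spec_exit_code exit_code exit_code_alt
  rw [exitLoop_eq]
  by_cases hc : findings.any (fun f => f.lookup "severity" == some "critical")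
  · simp [hc]
  · by_cases hh : findings.any (fun f => f.lookup "severity" == some "high") <;> simp [hc, hh]
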